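-- pv_equiv track=rewrite | github.com/oguuk/Programmers | 프로그래머스/unrated/142085. 디펜스 게임/디펜스 게임.py | solution
-- ===== SOURCE A (Python) =====
-- import heapq as hq
--
-- def solution(n, k, enemy):
--     answer = 0
--     enemy_rank = []
--
--     for e in enemy:
--         hq.heappush(enemy_rank, -e)
--         if n >= e:
--             answer += 1
--             n -= e
--         else:
--             if k > 0:
--                 k -= 1
--                 big = -hq.heappop(enemy_rank)
--                 if big >= e:
--                     n += (big - e)
--                 answer += 1
--             else:
--                 break
--     return answer
-- ===== SOURCE B (Python) =====
-- import heapq as hq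
--
-- def solution(n, k, enemy):
--     skipped = []  # min-heap of the waves currently covered by invincibility
--     for i, e in enumerate(enemy):
--         hq.heappush(skipped, e)
--         if len(skipped) > k:
--             n -= hq.heappop(skipped)
--             if n < 0:
--                 return i
--     return len(enemy)
-- ===== Notes on version B (the rewrite author's own statement) =====
-- stated objective: alternative
-- what changed: A's lazy greedy (max-heap of all waves seen, spending an invincibility refund when health runs out) is replaced by an eager one: a min-heap holding only the k waves currently being skipped; each wave is pushed and, once the heap exceeds k, the smallest candidate is popped and fought, failing when health goes negative.
-- outside the precondition, e.g. on solution(8, 2, [2, 1, 7, 5, -8, 14, 9, -2, 11]): A returns 6, B returns 8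
import Mathlib
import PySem

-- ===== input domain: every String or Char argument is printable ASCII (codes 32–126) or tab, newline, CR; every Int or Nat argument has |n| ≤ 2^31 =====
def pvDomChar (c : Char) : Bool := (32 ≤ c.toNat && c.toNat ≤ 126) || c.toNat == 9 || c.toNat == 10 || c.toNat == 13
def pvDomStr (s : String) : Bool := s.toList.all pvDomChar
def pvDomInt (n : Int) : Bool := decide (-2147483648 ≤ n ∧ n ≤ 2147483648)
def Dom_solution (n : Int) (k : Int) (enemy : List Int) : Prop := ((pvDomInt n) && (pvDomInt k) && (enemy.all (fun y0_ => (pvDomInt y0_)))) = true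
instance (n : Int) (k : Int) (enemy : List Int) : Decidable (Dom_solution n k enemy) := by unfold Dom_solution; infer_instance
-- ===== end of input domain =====

-- B replaces A's lazy max-heap-with-refund greedy by an eager min-heap of the k waves
-- currently skipped; equivalence is proved on the game's natural domain (nonnegative damage).

-- ===== PORT A =====
-- A's heapq heap of negated damages is ported as a plain list: heappush = cons,
-- heappop = remove (first occurrence of) the minimum, exact at the level of the
-- multiset of stored values, which is all heapq exposes here.
def solutionGo : Int → Int → List Int → Int → List Int → Int
  | _, _, _, answer, [] => answer
  | n, kA, heap, answer, e :: rest =>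
      if n ≥ e then solutionGo (n - e) kA ((-e) :: heap) (answer + 1) rest
      else if kA > 0 then
        let m := List.foldl min (-e) heap       -- heappop of (-e)::heap: the minimum
        let big := -m
        solutionGo (if big ≥ e then n + (big - e) else n) (kA - 1)
          (((-e) :: heap).erase m) (answer + 1) rest
      else answer

def solution (n : Int) (k : Int) (enemy : List Int) : Int :=
  solutionGo n k [] 0 enemy

-- ===== PORT B =====
-- B's heapq min-heap 'skipped' ported the same way: push = cons, pop = remove minimum.
def solutionAltGo (k : Int) : Int → List Int → Int → List Int → Int
  | _, _, i, [] => i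
  | n, skipped, i, e :: rest =>
      if ((e :: skipped).length : Int) > k then
        let v := List.foldl min e skipped       -- heappop of e::skipped: the minimum
        if n - v < 0 then i
        else solutionAltGo k (n - v) ((e :: skipped).erase v) (i + 1) rest
      else solutionAltGo k n (e :: skipped) (i + 1) rest

def solution_alt (n : Int) (k : Int) (enemy : List Int) : Int :=
  solutionAltGo k n [] 0 enemy

-- ===== PRECONDITION & SPEC =====
-- Pre_ excludes enemy lists containing a negative damage value: there A's online
-- "fight only while n ≥ e" rule and B's offline top-k skipping legitimately diverge
-- (negative "damage" heals, outside the game's natural domain).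
def Pre_solution (n : Int) (k : Int) (enemy : List Int) : Prop :=
  ∀ e ∈ enemy, 0 ≤ e
instance (n : Int) (k : Int) (enemy : List Int) : Decidable (Pre_solution n k enemy) := by
  unfold Pre_solution; infer_instance

def pvWitness_solution : Int × Int × List Int := (10, 1, [3, 5, 2])

def Spec_solution (n : Int) (k : Int) (enemy : List Int) (out : Int) : Prop := out = solution_alt n k enemy
instance (n : Int) (k : Int) (enemy : List Int) (out : Int) : Decidable (Spec_solution n k enemy out) := by unfold Spec_solution; infer_instance

-- ===== CLAIM (what is proved, stated in full; the proofs are below) =====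
def Claim_equal_solution : Prop := ∀ (n : Int) (k : Int) (enemy : List Int), Dom_solution n k enemy → Pre_solution n k enemy → Spec_solution n k enemy (solution n k enemy)

-- ===== LEMMAS AND PROOFS =====

-- foldl-min computes the minimum of a::l: it is a member and a lower bound.
lemma foldl_min_spec : ∀ (l : List Int) (a : Int),
    (List.foldl min a l = a ∨ List.foldl min a l ∈ l) ∧
    List.foldl min a l ≤ a ∧ (∀ x ∈ l, List.foldl min a l ≤ x) := by
  intro l
  induction l with
  | nil => intro a; simp
  | cons b t ih =>
    intro a
    have h := ih (min a b)
    refine ⟨?_, ?_, ?_⟩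
    · rcases h.1 with h1 | h1
      · rcases le_total a b with hab | hab
        · left; simp only [List.foldl_cons, h1]; exact min_eq_left hab
        · right; simp only [List.foldl_cons, h1]; simp [min_eq_right hab]
      · right; simp only [List.foldl_cons]; exact List.mem_cons_of_mem _ h1
    · simp only [List.foldl_cons]
      exact le_trans h.2.1 (min_le_left _ _)
    · intro x hx
      rcases List.mem_cons.mp hx with rfl | hx
      · simp only [List.foldl_cons]; exact le_trans h.2.1 (min_le_right _ _)
      · simp only [List.foldl_cons]; exact h.2.2 x hx

lemma msum_nonneg (s : Multiset Int) (h : ∀ x ∈ s, 0 ≤ x) : 0 ≤ s.sum := by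
  induction s using Multiset.induction with
  | empty => simp
  | cons a t ih =>
    simp only [Multiset.sum_cons]
    have := h a (Multiset.mem_cons_self a t)
    have ht := ih (fun x hx => h x (Multiset.mem_cons_of_mem hx))
    omega

-- k ≤ 0: A fights until it cannot; B pops every wave (its heap is always the singleton).
lemma go_kneg (k : Int) (hk : k ≤ 0) :
    ∀ (rest : List Int) (n i : Int) (heap : List Int),
      solutionGo n k heap i rest = solutionAltGo k n [] i rest := by
  intro rest
  induction rest with
  | nil => intro n i heap; simp [solutionGo, solutionAltGo]
  | cons e t ih =>
    intro n i heap
    simp only [solutionGo, solutionAltGo, List.length_cons, List.length_nil]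
    have hfold : List.foldl min e ([] : List Int) = e := rfl
    rw [if_pos (show ((0 + 1 : ℕ) : Int) > k by push_cast; omega)]
    simp only [hfold]
    by_cases hf : n ≥ e
    · rw [if_pos hf, if_neg (show ¬ (n - e < 0) by omega)]
      have herase : ([e].erase e) = ([] : List Int) := by simp
      rw [herase]
      exact ih (n - e) (i + 1) ((-e) :: heap)
    · rw [if_neg hf, if_neg (show ¬ k > 0 by omega), if_pos (show n - e < 0 by omega)]

-- n < 0, k ≥ 0: A pops every wave from its singleton heap until k is exhausted.
lemma goA_neg : ∀ (rest : List Int) (n kA i : Int), n < 0 → (∀ x ∈ rest, 0 ≤ x) →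
    solutionGo n kA [] i rest = i + min (rest.length : Int) (max kA 0) := by
  intro rest
  induction rest with
  | nil =>
    intro n kA i hn _
    simp only [solutionGo, List.length_nil]
    omega
  | cons e t ih =>
    intro n kA i hn hr
    have he : 0 ≤ e := hr e (List.mem_cons_self)
    simp only [solutionGo, List.length_cons]
    rw [if_neg (by omega)]
    by_cases hk : kA > 0
    · rw [if_pos hk]
      have hfold : List.foldl min (-e) ([] : List Int) = -e := rfl
      simp only [hfold]
      rw [if_pos (by omega : -(-e) ≥ e)]
      have herase : (((-e) :: ([] : List Int)).erase (-e)) = [] := by simp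
      rw [herase]
      have := ih (n + (-(-e) - e)) (kA - 1) (i + 1) (by omega)
        (fun x hx => hr x (List.mem_cons_of_mem _ hx))
      rw [this]
      push_cast
      omega
    · rw [if_neg hk]
      push_cast
      omega

lemma goB_neg (k : Int) : ∀ (rest : List Int) (n : Int) (skipped : List Int) (i : Int),
    n < 0 → (∀ x ∈ rest, 0 ≤ x) → (∀ x ∈ skipped, 0 ≤ x) → (skipped.length : Int) ≤ k →
    solutionAltGo k n skipped i rest = i + min (rest.length : Int) (k - skipped.length) := by
  intro rest
  induction rest with
  | nil =>
    intro n skipped i hn _ _ hlen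
    simp only [solutionAltGo, List.length_nil]
    omega
  | cons e t ih =>
    intro n skipped i hn hr hs hlen
    have he : 0 ≤ e := hr e (List.mem_cons_self)
    simp only [solutionAltGo]
    by_cases hp : (((e :: skipped).length : ℕ) : Int) > k
    · rw [if_pos hp]
      have hspec := foldl_min_spec skipped e
      have hv : 0 ≤ List.foldl min e skipped := by
        rcases hspec.1 with h1 | h1
        · omega
        · exact hs _ h1
      rw [if_pos (show n - List.foldl min e skipped < 0 by omega)]
      simp only [List.length_cons] at hp
      push_cast at hp ⊢
      omega
    · rw [if_neg hp]
      have hrec := ih n (e :: skipped) (i + 1) hn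
        (fun x hx => hr x (List.mem_cons_of_mem _ hx))
        (by intro x hx; rcases List.mem_cons.mp hx with rfl | hx; exact he; exact hs x hx)
        (by simp only [List.length_cons] at hp ⊢; push_cast at hp ⊢; omega)
      rw [hrec]
      simp only [List.length_cons] at hp ⊢
      push_cast at hp ⊢
      omega

-- The main bisimulation, n ≥ 0, k ≥ 0.  Ghost multisets:
--   P: values B is currently skipping that A has (conceptually) spent a pop on,
--   M: values B is skipping that are still in A's heap,
--   R: values in A's heap that B has already fought.
lemma go_main (k : Int) (hk : 0 ≤ k) :
    ∀ (rest : List Int) (nA kA nB i : Int) (heap skipped : List Int) (P M R : Multiset Int),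
      (∀ x ∈ rest, 0 ≤ x) →
      ((heap.map (fun x => -x) : Multiset Int) = M + R) →
      ((skipped : Multiset Int) = P + M) →
      nB = nA + M.sum →
      (∀ x ∈ P, nA < x) →
      (∀ x ∈ M, ∀ y ∈ P, x ≤ y) →
      (∀ x ∈ R, (∀ y ∈ P, x ≤ y) ∧ (∀ y ∈ M, x ≤ y)) →
      0 ≤ nA →
      kA = k - (Multiset.card P : Int) →
      ((Multiset.card P : Int) + (Multiset.card M : Int) ≤ k) →
      (R ≠ 0 → (Multiset.card P : Int) + (Multiset.card M : Int) = k) →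
      (∀ x ∈ M, 0 ≤ x) →
      solutionGo nA kA heap i rest = solutionAltGo k nB skipped i rest := by
  intro rest
  induction rest with
  | nil =>
    intro nA kA nB i heap skipped P M R _ _ _ _ _ _ _ _ _ _ _ _
    simp [solutionGo, solutionAltGo]
  | cons e t ih =>
    intro nA kA nB i heap skipped P M R hrest hI1 hI2 hI3 hI4 hI5 hI6 hI7 hI8 hI9 hI10 hI11
    have he : 0 ≤ e := hrest e List.mem_cons_self
    have ht : ∀ x ∈ t, 0 ≤ x := fun x hx => hrest x (List.mem_cons_of_mem _ hx)
    have hlen : (skipped.length : Int) = (Multiset.card P : Int) + (Multiset.card M : Int) := by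
      have hc : Multiset.card (skipped : Multiset Int) = Multiset.card P + Multiset.card M := by
        rw [hI2, Multiset.card_add]
      rw [Multiset.coe_card] at hc
      exact_mod_cast congrArg (Nat.cast : ℕ → Int) hc
    -- B's pop value and its spec
    have hvspec := foldl_min_spec skipped e
    set v := List.foldl min e skipped with hvdef
    have hvmem : v = e ∨ v ∈ P + M := by
      rcases hvspec.1 with h1 | h1
      · exact Or.inl h1
      · right; rw [← hI2]; exact Multiset.mem_coe.mpr h1
    have hvle_e : v ≤ e := hvspec.2.1
    have hvle : ∀ x ∈ P + M, v ≤ x := by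
      intro x hx
      rw [← hI2] at hx
      exact hvspec.2.2 x (Multiset.mem_coe.mp hx)
    have hs2 : ((((e :: skipped).erase v) : List Int) : Multiset Int)
        = (e ::ₘ (P + M)).erase v := by
      rw [← Multiset.coe_erase]
      congr 1
      rw [← Multiset.cons_coe, hI2]
    -- A's pop value and its spec
    have hmspec := foldl_min_spec heap (-e)
    set mneg := List.foldl min (-e) heap with hmdef
    set big := -mneg with hbigdef
    have hbigmem : big = e ∨ big ∈ M + R := by
      rcases hmspec.1 with h1 | h1
      · left; rw [hbigdef, h1]; ring
      · right
        rw [← hI1]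
        exact Multiset.mem_coe.mpr (List.mem_map_of_mem h1)
    have hbige : e ≤ big := by
      have := hmspec.2.1; rw [hbigdef]; omega
    have hbigub : ∀ x ∈ M + R, x ≤ big := by
      intro x hx
      rw [← hI1] at hx
      obtain ⟨y, hy, hxy⟩ := List.mem_map.mp (Multiset.mem_coe.mp hx)
      have := hmspec.2.2 y hy
      rw [hbigdef]; omega
    have hheap2 : (((((-e) :: heap).erase mneg).map (fun x => -x) : List Int) : Multiset Int)
        = (e ::ₘ (M + R)).erase big := by
      rw [List.map_erase (show Function.Injective (fun x : Int => -x) by intro a b h; simpa using h)]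
      rw [← Multiset.coe_erase]
      congr 1
      · simp only [List.map_cons, neg_neg, ← Multiset.cons_coe, hI1]
    -- membership/decomposition helpers
    have hpush : ((List.map (fun x => -x) ((-e) :: heap) : List Int) : Multiset Int)
        = e ::ₘ (M + R) := by
      simp only [List.map_cons, neg_neg, ← Multiset.cons_coe, hI1]
    have hconsB : (((e :: skipped) : List Int) : Multiset Int) = e ::ₘ (P + M) := by
      rw [← Multiset.cons_coe, hI2]
    simp only [solutionGo, solutionAltGo, List.length_cons]
    by_cases hf : nA ≥ e
    · rw [if_pos hf]
      by_cases hb : (((skipped.length + 1 : ℕ)) : Int) > k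
      · -- B pops; card P + card M = k
        rw [if_pos hb]
        push_cast at hb
        have hsum : (Multiset.card P : Int) + (Multiset.card M : Int) = k := by omega
        have hvPM : v = e ∨ v ∈ M := by
          rcases hvmem with h1 | h1
          · exact Or.inl h1
          · rcases Multiset.mem_add.mp h1 with h2 | h2
            · exfalso; have := hI4 v h2; have := hvle_e; omega
            · exact Or.inr h2
        have hMsum0 : 0 ≤ M.sum := msum_nonneg M hI11
        have hcont : ¬ (nB - v < 0) := by
          rcases hvPM with hve | h2
          · omega
          · have hM : M = v ::ₘ M.erase v := (Multiset.cons_erase h2).symm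
            have h0 : 0 ≤ (M.erase v).sum :=
              msum_nonneg _ (fun x hx => hI11 x (Multiset.mem_of_mem_erase hx))
            have hsv : M.sum = v + (M.erase v).sum := by
              conv_lhs => rw [hM]
              rw [Multiset.sum_cons]
            omega
        rw [if_neg hcont]
        by_cases hvM : v ∈ M
        · -- v moves from B's heap to R, e joins M
          have hM : M = v ::ₘ M.erase v := (Multiset.cons_erase hvM).symm
          have hsv : M.sum = v + (M.erase v).sum := by
            conv_lhs => rw [hM]
            rw [Multiset.sum_cons]
          have hcardv : Multiset.card M = Multiset.card (M.erase v) + 1 := by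
            conv_lhs => rw [hM]
            rw [Multiset.card_cons]
          refine ih (nA - e) kA (nB - v) (i + 1) _ _ P (e ::ₘ M.erase v) (v ::ₘ R) ht ?_ ?_ (by rw [Multiset.sum_cons]; omega) ?_ ?_ ?_ (by omega) hI8 ?_ ?_ ?_
          · rw [hpush]
            conv_lhs => rw [hM]
            simp only [← Multiset.singleton_add]
            abel
          · rw [hs2]
            conv_lhs => rw [hM]
            rw [show e ::ₘ (P + (v ::ₘ M.erase v)) = v ::ₘ (P + (e ::ₘ M.erase v)) by
              simp only [← Multiset.singleton_add]; abel]
            rw [Multiset.erase_cons_head]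
          · intro x hx; have := hI4 x hx; omega
          · intro x hx y hy
            rcases Multiset.mem_cons.mp hx with rfl | hx2
            · have := hI4 y hy; omega
            · exact hI5 x (Multiset.mem_of_mem_erase hx2) y hy
          · intro x hx
            rcases Multiset.mem_cons.mp hx with rfl | hx2
            · refine ⟨fun y hy => hvle y (Multiset.mem_add.mpr (Or.inl hy)), ?_⟩
              intro y hy
              rcases Multiset.mem_cons.mp hy with rfl | hy2
              · exact hvle_e
              · exact hvle y (Multiset.mem_add.mpr (Or.inr (Multiset.mem_of_mem_erase hy2)))
            · refine ⟨(hI6 x hx2).1, ?_⟩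
              intro y hy
              rcases Multiset.mem_cons.mp hy with rfl | hy2
              · exact le_trans ((hI6 x hx2).2 v hvM) hvle_e
              · exact (hI6 x hx2).2 y (Multiset.mem_of_mem_erase hy2)
          · rw [Multiset.card_cons]; push_cast; omega
          · intro _; rw [Multiset.card_cons]; push_cast; omega
          · intro x hx
            rcases Multiset.mem_cons.mp hx with rfl | hx2
            · exact he
            · exact hI11 x (Multiset.mem_of_mem_erase hx2)
        · -- v = e: B pops the new wave itself; e joins R
          have hve : v = e := by tauto
          refine ih (nA - e) kA (nB - v) (i + 1) _ _ P M (e ::ₘ R) ht ?_ ?_ (by omega) ?_ hI5 ?_ (by omega) hI8 (by omega) ?_ hI11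
          · rw [hpush]
            simp only [← Multiset.singleton_add]
            abel
          · rw [hs2, hve, Multiset.erase_cons_head]
          · intro x hx; have := hI4 x hx; omega
          · intro x hx
            rcases Multiset.mem_cons.mp hx with rfl | hx2
            · refine ⟨fun y hy => ?_, fun y hy => ?_⟩
              · have := hI4 y hy; omega
              · rw [← hve]; exact hvle y (Multiset.mem_add.mpr (Or.inr hy))
            · exact hI6 x hx2
          · intro _; push_cast; omega
      · -- B only pushes: R must be empty, e joins M
        rw [if_neg hb]
        push_cast at hb
        have hR0 : R = 0 := by
          by_contra hR
          have := hI10 hR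
          omega
        refine ih (nA - e) kA nB (i + 1) _ _ P (e ::ₘ M) 0 ht ?_ ?_ ?_ ?_ ?_ (by simp) (by omega) hI8 ?_ (by simp) ?_
        · rw [hpush, hR0]
          simp only [← Multiset.singleton_add]
          abel
        · rw [hconsB]
          simp only [← Multiset.singleton_add]
          abel
        · rw [Multiset.sum_cons]; omega
        · intro x hx; have := hI4 x hx; omega
        · intro x hx y hy
          rcases Multiset.mem_cons.mp hx with rfl | hx2
          · have := hI4 y hy; omega
          · exact hI5 x hx2 y hy
        · rw [Multiset.card_cons]; push_cast; omega
        · intro x hx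
          rcases Multiset.mem_cons.mp hx with rfl | hx2
          · exact he
          · exact hI11 x hx2
    · rw [if_neg hf]
      by_cases hkA : kA > 0
      · -- A pops
        rw [if_pos hkA, if_pos (show big ≥ e from hbige)]
        have hPk : (Multiset.card P : Int) < k := by omega
        by_cases hb : (((skipped.length + 1 : ℕ)) : Int) > k
        · -- both pop
          rw [if_pos hb]
          push_cast at hb
          have hsum : (Multiset.card P : Int) + (Multiset.card M : Int) = k := by omega
          have hMne : M ≠ 0 := by
            intro h
            rw [h] at hsum
            simp at hsum
            omega
          obtain ⟨m0, hm0⟩ := Multiset.exists_mem_of_ne_zero hMne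
          have hvm0 : v ≤ m0 := hvle m0 (Multiset.mem_add.mpr (Or.inr hm0))
          have hm0big : m0 ≤ big := hbigub m0 (Multiset.mem_add.mpr (Or.inl hm0))
          have hvPM : v = e ∨ v ∈ M := by
            rcases hvmem with h1 | h1
            · exact Or.inl h1
            · rcases Multiset.mem_add.mp h1 with h2 | h2
              · right
                have h3 : m0 ≤ v := hI5 m0 hm0 v h2
                have : v = m0 := le_antisymm (by omega) h3
                rw [this]; exact hm0
              · exact Or.inr h2
          have hbigEM : big = e ∨ big ∈ M := by
            rcases hbigmem with h1 | h1
            · exact Or.inl h1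
            · rcases Multiset.mem_add.mp h1 with h2 | h2
              · exact Or.inr h2
              · right
                have h3 : big ≤ m0 := (hI6 big h2).2 m0 hm0
                have : big = m0 := le_antisymm h3 hm0big
                rw [this]; exact hm0
          -- decompose e ::ₘ M = v ::ₘ big ::ₘ s2
          have hv1 : v ∈ e ::ₘ M := by
            rcases hvPM with hve | h2
            · rw [hve]; exact Multiset.mem_cons_self e M
            · exact Multiset.mem_cons_of_mem h2
          have hbig1 : big ∈ (e ::ₘ M).erase v := by
            by_cases hbv : big = v
            · have hev : e = v := le_antisymm (by rw [hbv] at hbige; omega) hvle_e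
              have heM : e ∈ M := by
                rcases hbigEM with h1 | h1
                · have : m0 = e := le_antisymm (by omega) (by
                    have := hvle m0 (Multiset.mem_add.mpr (Or.inr hm0)); omega)
                  rw [← this]; exact hm0
                · rw [hbv, ← hev] at h1; exact h1
              rw [← hev, Multiset.erase_cons_head]
              rw [hbv, ← hev]
              exact heM
            · rw [Multiset.mem_erase_of_ne hbv]
              rcases hbigEM with h1 | h1
              · rw [h1]; exact Multiset.mem_cons_self e M
              · exact Multiset.mem_cons_of_mem h1
          have hdec : e ::ₘ M = v ::ₘ big ::ₘ (((e ::ₘ M).erase v).erase big) := by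
            rw [Multiset.cons_erase hbig1, Multiset.cons_erase hv1]
          set s2 : Multiset Int := ((e ::ₘ M).erase v).erase big with hs2def
          have hs2sub : ∀ x ∈ s2, x = e ∨ x ∈ M := by
            intro x hx
            have : x ∈ e ::ₘ M :=
              Multiset.mem_of_mem_erase (Multiset.mem_of_mem_erase hx)
            exact Multiset.mem_cons.mp this
          have h_e_copy : e ∈ s2 → e ∉ M → (v ∈ M ∧ big ∈ M) := by
            intro hes2 heM
            have hcnt : Multiset.count e M = 0 := Multiset.count_eq_zero.mpr heM
            have hveq : v ≠ e := by
              intro hve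
              have : Multiset.count e ((e ::ₘ M).erase v) = 0 := by
                rw [hve, Multiset.count_erase_self, Multiset.count_cons_self, hcnt]
              have h1 : e ∈ (e ::ₘ M).erase v := Multiset.mem_of_mem_erase hes2
              rw [← Multiset.count_pos, this] at h1
              omega
            have hbeq : big ≠ e := by
              intro hbe
              have h1 : Multiset.count e ((e ::ₘ M).erase v)
                  = Multiset.count e (e ::ₘ M) := Multiset.count_erase_of_ne (Ne.symm hveq) _
              have h2 : Multiset.count e s2 = Multiset.count e ((e ::ₘ M).erase v) - 1 := by
                rw [hs2def, hbe, Multiset.count_erase_self]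
              have h3 : Multiset.count e (e ::ₘ M) = 1 := by
                rw [Multiset.count_cons_self, hcnt]
              have h4 : 0 < Multiset.count e s2 := Multiset.count_pos.mpr hes2
              omega
            constructor
            · rcases hvPM with h1 | h1; exact absurd h1 hveq; exact h1
            · rcases hbigEM with h1 | h1; exact absurd h1 hbeq; exact h1
          have hsums : e + M.sum = v + (big + s2.sum) := by
            have := congrArg Multiset.sum hdec
            simpa [Multiset.sum_cons] using this
          have hcards : Multiset.card M + 1 = Multiset.card s2 + 2 := by
            have := congrArg Multiset.card hdec
            simpa [Multiset.card_cons] using this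
          have hcont : ¬ (nB - v < 0) := by
            have hM : M = m0 ::ₘ M.erase m0 := (Multiset.cons_erase hm0).symm
            have h0 : 0 ≤ (M.erase m0).sum :=
              msum_nonneg _ (fun x hx => hI11 x (Multiset.mem_of_mem_erase hx))
            have hsv : M.sum = m0 + (M.erase m0).sum := by
              conv_lhs => rw [hM]
              rw [Multiset.sum_cons]
            omega
          rw [if_neg hcont]
          refine ih (nA + (big - e)) (kA - 1) (nB - v) (i + 1) _ _ (big ::ₘ P) s2 (v ::ₘ R) ht ?_ ?_ (by omega) ?_ ?_ ?_ (by omega) ?_ ?_ ?_ ?_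
          · rw [hheap2]
            rw [show e ::ₘ (M + R) = big ::ₘ (s2 + (v ::ₘ R)) by
              rw [show e ::ₘ (M + R) = (e ::ₘ M) + R by
                simp only [← Multiset.singleton_add]; abel, hdec]
              simp only [← Multiset.singleton_add]; abel]
            rw [Multiset.erase_cons_head]
          · rw [hs2]
            rw [show e ::ₘ (P + M) = v ::ₘ ((big ::ₘ P) + s2) by
              rw [show e ::ₘ (P + M) = (e ::ₘ M) + P by
                simp only [← Multiset.singleton_add]; abel, hdec]
              simp only [← Multiset.singleton_add]; abel]
            rw [Multiset.erase_cons_head]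
          · intro x hx
            rcases Multiset.mem_cons.mp hx with rfl | hx2
            · omega
            · have h1 := hI4 x hx2
              rcases hbigEM with hbe | hbM
              · omega
              · have := hI5 big hbM x hx2; omega
          · intro x hx y hy
            have hxb : x ≤ big := by
              rcases hs2sub x hx with rfl | hxM
              · exact hbige
              · exact hbigub x (Multiset.mem_add.mpr (Or.inl hxM))
            rcases Multiset.mem_cons.mp hy with rfl | hy2
            · exact hxb
            · rcases hs2sub x hx with hxe | hxM
              · by_cases heM : e ∈ M
                · rw [hxe]; exact hI5 e heM y hy2
                · obtain ⟨_, hbM⟩ := h_e_copy (hxe ▸ hx) heM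
                  exact le_trans hxb (hI5 big hbM y hy2)
              · exact hI5 x hxM y hy2
          · intro x hx
            rcases Multiset.mem_cons.mp hx with rfl | hx2
            · constructor
              · intro y hy
                rcases Multiset.mem_cons.mp hy with rfl | hy2
                · omega
                · exact hvle y (Multiset.mem_add.mpr (Or.inl hy2))
              · intro y hy
                rcases hs2sub y hy with rfl | hyM
                · exact hvle_e
                · exact hvle y (Multiset.mem_add.mpr (Or.inr hyM))
            · constructor
              · intro y hy
                rcases Multiset.mem_cons.mp hy with rfl | hy2
                · exact hbigub x (Multiset.mem_add.mpr (Or.inr hx2))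
                · exact (hI6 x hx2).1 y hy2
              · intro y hy
                rcases hs2sub y hy with hye | hyM
                · by_cases heM : e ∈ M
                  · rw [hye]; exact (hI6 x hx2).2 e heM
                  · obtain ⟨hvM2, _⟩ := h_e_copy (by rw [← hye]; exact hy) heM
                    rw [hye]
                    exact le_trans ((hI6 x hx2).2 v hvM2) hvle_e
                · exact (hI6 x hx2).2 y hyM
          · rw [Multiset.card_cons]; push_cast; omega
          · rw [Multiset.card_cons]; push_cast; omega
          · intro _; rw [Multiset.card_cons]; push_cast; omega
          · intro x hx
            rcases hs2sub x hx with rfl | hxM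
            · exact he
            · exact hI11 x hxM
        · -- only A pops; R = 0
          rw [if_neg hb]
          push_cast at hb
          have hR0 : R = 0 := by
            by_contra hR
            have := hI10 hR
            omega
          have hbigEM : big = e ∨ big ∈ M := by
            rcases hbigmem with h1 | h1
            · exact Or.inl h1
            · rw [hR0] at h1
              simp only [Multiset.add_zero] at h1
              exact Or.inr h1
          rcases hbigEM with hbe | hbM
          · -- big = e: A pops the new wave itself
            refine ih (nA + (big - e)) (kA - 1) nB (i + 1) _ _ (e ::ₘ P) M 0 ht ?_ ?_ (by omega) ?_ ?_ (by simp) (by omega) ?_ ?_ (by simp) hI11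
            · rw [hheap2, hbe, Multiset.erase_cons_head, hR0]
            · rw [hconsB]
              simp only [← Multiset.singleton_add]
              abel
            · intro x hx
              rcases Multiset.mem_cons.mp hx with rfl | hx2
              · omega
              · have := hI4 x hx2; omega
            · intro x hx y hy
              rcases Multiset.mem_cons.mp hy with rfl | hy2
              · have := hbigub x (Multiset.mem_add.mpr (Or.inl hx)); omega
              · exact hI5 x hx y hy2
            · rw [Multiset.card_cons]; push_cast; omega
            · rw [Multiset.card_cons]; push_cast; omega
          · -- big comes from M
            have hM : M = big ::ₘ M.erase big := (Multiset.cons_erase hbM).symm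
            have hsv : M.sum = big + (M.erase big).sum := by
              conv_lhs => rw [hM]
              rw [Multiset.sum_cons]
            have hcardb : Multiset.card M = Multiset.card (M.erase big) + 1 := by
              conv_lhs => rw [hM]
              rw [Multiset.card_cons]
            refine ih (nA + (big - e)) (kA - 1) nB (i + 1) _ _ (big ::ₘ P) (e ::ₘ M.erase big) 0 ht ?_ ?_ ?_ ?_ ?_ (by simp) (by omega) ?_ ?_ (by simp) ?_
            · rw [hheap2, hR0]
              rw [show e ::ₘ (M + 0) = big ::ₘ ((e ::ₘ M.erase big) + 0) by
                conv_lhs => rw [hM]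
                simp only [← Multiset.singleton_add]; abel]
              rw [Multiset.erase_cons_head]
            · rw [hconsB]
              conv_lhs => rw [hM]
              simp only [← Multiset.singleton_add]
              abel
            · rw [Multiset.sum_cons]
              have : (M.erase big).sum = M.sum - big := by omega
              omega
            · intro x hx
              rcases Multiset.mem_cons.mp hx with rfl | hx2
              · omega
              · have h1 := hI4 x hx2
                have := hI5 big hbM x hx2
                omega
            · intro x hx y hy
              have hxb : x ≤ big := by
                rcases Multiset.mem_cons.mp hx with rfl | hx2
                · exact hbige
                · exact hbigub x
                    (Multiset.mem_add.mpr (Or.inl (Multiset.mem_of_mem_erase hx2)))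
              rcases Multiset.mem_cons.mp hy with rfl | hy2
              · exact hxb
              · exact le_trans hxb (hI5 big hbM y hy2)
            · rw [Multiset.card_cons]; push_cast; omega
            · rw [Multiset.card_cons, Multiset.card_cons]; push_cast; omega
            · intro x hx
              rcases Multiset.mem_cons.mp hx with rfl | hx2
              · exact he
              · exact hI11 x (Multiset.mem_of_mem_erase hx2)
      · -- A breaks; B must fail too
        rw [if_neg hkA]
        have hM0 : M = 0 := by
          rw [← Multiset.card_eq_zero]
          omega
        have hb : (((skipped.length + 1 : ℕ)) : Int) > k := by
          push_cast
          rw [hM0] at hlen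
          simp at hlen
          omega
        rw [if_pos hb]
        have hfail : nB - v < 0 := by
          have hnv : nA < v := by
            rcases hvmem with h1 | h1
            · omega
            · rw [hM0] at h1
              simp only [Multiset.add_zero] at h1
              exact hI4 v h1
          rw [hM0] at hI3
          simp at hI3
          omega
        rw [if_pos hfail]

-- ===== VERDICT (by name: the statement is the Claim_ definition above) =====
theorem solution_spec : Claim_equal_solution := by
  intro n k enemy _hdom hpre
  unfold Spec_solution solution solution_alt
  by_cases hk : k ≤ 0
  · exact go_kneg k hk enemy n 0 []
  · have hk' : 0 ≤ k := by omega
    by_cases hn : n < 0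
    · rw [goA_neg enemy n k 0 hn hpre, goB_neg k enemy n [] 0 hn hpre (by simp) (by simp; omega)]
      simp
      omega
    · refine go_main k hk' enemy n k n 0 [] [] 0 0 0 hpre (by simp) (by simp) (by simp) ?_ ?_ ?_ (by omega) (by simp) (by simp; omega) (by simp) ?_
      · intro x hx; simp at hx
      · intro x hx; simp at hx
      · intro x hx; simp at hx
      · intro x hx; simp at hx
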